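-- pv_equiv track=rewrite | github.com/heze8/OptimizingDeliveryRoutes | Util.py | generate_actions_dict
-- ===== SOURCE A (Python) =====
-- def generate_actions_dict(riders, actions):
--     action_dict = dict()
--     action_space = 4**riders
--     for i in range(action_space):
--         action_list = list()
--         for j in range(riders):
--             action_list.append(actions[(i // (4**(riders - j - 1)) % 4)])
--         action_dict[i] = action_list
--     return action_dict
-- ===== SOURCE B (Python) =====
-- def generate_actions_dict(riders, actions):
--     rows = [[]]
--     for _ in range(riders):
--         rows = [row + [actions[d]] for row in rows for d in range(4)]
--     return {i: row for i, row in enumerate(rows)}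
-- ===== Notes on version B (the rewrite author's own statement) =====
-- stated objective: idiomatic
-- what changed: Instead of arithmetically decoding every index i via i // 4**(riders-j-1) % 4 in a double loop, B grows the list of all action rows by a 4-way cartesian-product step per rider and enumerates the result.
import Mathlib
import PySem

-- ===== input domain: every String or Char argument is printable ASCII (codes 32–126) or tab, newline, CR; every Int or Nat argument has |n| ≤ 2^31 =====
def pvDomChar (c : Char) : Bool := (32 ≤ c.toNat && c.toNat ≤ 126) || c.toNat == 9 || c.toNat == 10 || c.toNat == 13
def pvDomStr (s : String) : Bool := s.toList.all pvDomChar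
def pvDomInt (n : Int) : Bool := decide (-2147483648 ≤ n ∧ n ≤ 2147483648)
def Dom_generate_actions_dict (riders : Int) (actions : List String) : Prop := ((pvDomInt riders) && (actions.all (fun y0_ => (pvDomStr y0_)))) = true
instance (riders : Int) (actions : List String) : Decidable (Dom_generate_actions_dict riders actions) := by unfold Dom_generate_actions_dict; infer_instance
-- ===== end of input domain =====

-- B replaces A's per-index base-4 arithmetic decode with growing the product of action rows one rider at a time (idiomatic, same cost).


-- ===== PORT A =====
-- Literal port of A: a dict built by inserting, for each i in range(4**riders), the list decoded
-- digit by digit via i // 4**(riders-j-1) % 4.  actions[k] is ported as pyGetD with default ""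
-- (inside Pre_ every index used is 0..3 < len(actions), so this is exact there).
def generate_actions_dict (riders : Int) (actions : List String) : List (Int × List String) :=
  let action_space : Int := 4 ^ riders.toNat
  ((PySem.List.pyRange 0 action_space).foldl (fun d i =>
      let action_list := (PySem.List.pyRange 0 riders).foldl (fun al j =>
        al ++ [PySem.List.pyGetD actions
                 (PySem.Int.mod (PySem.Int.floordiv i (4 ^ (riders - j - 1).toNat)) 4) ""]) []
      d.insert i action_list) PySem.Dict.empty).items

-- ===== PORT B =====
-- Port of B: rows grown one rider at a time by a 4-way product step; the final dict comprehension
-- over enumerate(rows) has the distinct fresh keys 0..len(rows)-1, so its pair list IS enumerate(rows).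
def generate_actions_dict_alt (riders : Int) (actions : List String) : List (Int × List String) :=
  let rows := (PySem.List.pyRange 0 riders).foldl (fun rows _ =>
      rows.flatMap (fun row =>
        (PySem.List.pyRange 0 4).map (fun d => row ++ [PySem.List.pyGetD actions d ""]))) [[]]
  PySem.List.enumerate rows

-- ===== PRECONDITION & SPEC =====
-- Pre_ excludes exactly the inputs where Python A raises: riders < 0 (TypeError: range of a float
-- 4**riders) and riders ≥ 1 with len(actions) < 4 (IndexError on actions[3]); B also raises on the latter.
def Pre_generate_actions_dict (riders : Int) (actions : List String) : Prop :=
  0 ≤ riders ∧ (riders = 0 ∨ 4 ≤ actions.length)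
instance (riders : Int) (actions : List String) : Decidable (Pre_generate_actions_dict riders actions) := by
  unfold Pre_generate_actions_dict; infer_instance

def pvWitness_generate_actions_dict : Int × List String := (2, ["N", "S", "E", "W"])

def Spec_generate_actions_dict (riders : Int) (actions : List String) (out : List (Int × List String)) : Prop := out = generate_actions_dict_alt riders actions
instance (riders : Int) (actions : List String) (out : List (Int × List String)) : Decidable (Spec_generate_actions_dict riders actions out) := by unfold Spec_generate_actions_dict; infer_instance

-- ===== CLAIM (what is proved, stated in full; the proofs are below) =====
def Claim_equal_generate_actions_dict : Prop := ∀ (riders : Int) (actions : List String), Dom_generate_actions_dict riders actions → Pre_generate_actions_dict riders actions → Spec_generate_actions_dict riders actions (generate_actions_dict riders actions)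

-- ===== LEMMAS AND PROOFS =====

-- the canonical row decoded from index i for n riders
def pvRow (actions : List String) (n i : Nat) : List String :=
  (List.range n).map (fun j => PySem.List.pyGetD actions ((i / 4 ^ (n - 1 - j) % 4 : Nat) : Int) "")

theorem pv_foldl_app {α β : Type} (f : α → β) : ∀ (l : List α) (init : List β),
    l.foldl (fun al j => al ++ [f j]) init = init ++ l.map f := by
  intro l
  induction l with
  | nil => simp
  | cons x xs ih => intro init; simp [List.foldl_cons, ih]

theorem pv_range_mul (k : Nat) : ∀ m : Nat,
    List.range (m * k) = (List.range m).flatMap (fun q => (List.range k).map (fun r => k * q + r)) := by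
  intro m
  induction m with
  | zero => simp
  | succ m ih =>
      have h : (m + 1) * k = m * k + k := by ring
      rw [h, List.range_add, List.range_succ, List.flatMap_append, ← ih]
      simp [Nat.mul_comm]

theorem pv_row_step (actions : List String) (n q r : Nat) (hr : r < 4) :
    pvRow actions (n + 1) (4 * q + r)
      = pvRow actions n q ++ [PySem.List.pyGetD actions ((r : Nat) : Int) ""] := by
  unfold pvRow
  rw [List.range_succ, List.map_append]
  congr 1
  · apply List.map_congr_left
    intro j hj
    simp only [List.mem_range] at hj
    have h1 : n + 1 - 1 - j = (n - 1 - j) + 1 := by omega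
    rw [h1, pow_succ']
    rw [← Nat.div_div_eq_div_mul]
    have h2 : (4 * q + r) / 4 = q := by omega
    rw [h2]
  · have h0 : n + 1 - 1 - n = 0 := by omega
    have h3 : (4 * q + r) % 4 = r := by omega
    simp only [List.map_cons, List.map_nil]
    rw [h0, pow_zero, Nat.div_one, h3]

theorem pv_rows (actions : List String) : ∀ n : Nat,
    (PySem.List.pyRange 0 (n : Int)).foldl (fun rows _ =>
        rows.flatMap (fun row =>
          (PySem.List.pyRange 0 4).map (fun d => row ++ [PySem.List.pyGetD actions d ""]))) [[]]
      = (List.range (4 ^ n)).map (pvRow actions n) := by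
  intro n
  induction n with
  | zero => simp [PySem.List.pyRange_zero, pvRow]
  | succ n ih =>
      rw [show ((n + 1 : Nat) : Int) = (n : Int) + 1 by omega,
          PySem.List.pyRange_one_succ_right (by positivity), List.foldl_append, ih]
      simp only [List.foldl_cons, List.foldl_nil]
      rw [show (4 : Int) = ((4 : Nat) : Int) from rfl, PySem.List.pyRange_zero_nat,
          show (4 : Nat) ^ (n + 1) = 4 ^ n * 4 from pow_succ 4 n, pv_range_mul]
      rw [List.flatMap_map, List.map_flatMap]
      apply List.flatMap_congr
      intro q hq
      simp only [List.map_map]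
      apply List.map_congr_left
      intro r hr
      simp only [List.mem_range] at hr
      simp only [Function.comp]
      rw [pv_row_step actions n q r hr]

theorem pv_items_fold (v : Int → List String) (l : List Int) (hl : l.Nodup) :
    (l.foldl (fun d i => d.insert i (v i)) PySem.Dict.empty).items
      = l.map (fun i => (i, v i)) := by
  have h := PySem.Dict.items_foldl_insert_fresh l (fun i => i) v PySem.Dict.empty
      (fun a _ => PySem.Dict.contains_empty a) (by simpa using hl)
  simpa using h

theorem pv_A (riders : Int) (actions : List String) (h : 0 ≤ riders) :
    generate_actions_dict riders actions
      = (List.range (4 ^ riders.toNat)).map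
          (fun i : Nat => ((i : Int), pvRow actions riders.toNat i)) := by
  obtain ⟨n, rfl⟩ : ∃ n : Nat, riders = (n : Int) := ⟨riders.toNat, (Int.toNat_of_nonneg h).symm⟩
  simp only [generate_actions_dict, Int.toNat_natCast]
  rw [show ((4 : Int) ^ n) = (((4 : Nat) ^ n : Nat) : Int) by push_cast; ring,
      PySem.List.pyRange_zero_nat, PySem.List.pyRange_zero_nat]
  rw [pv_items_fold _ _ ((List.nodup_range).map Nat.cast_injective)]
  rw [List.map_map]
  apply List.map_congr_left
  intro i _
  simp only [Function.comp]
  congr 1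
  rw [pv_foldl_app, List.nil_append, List.map_map]
  unfold pvRow
  apply List.map_congr_left
  intro j hj
  simp only [List.mem_range] at hj
  simp only [Function.comp]
  have e1 : ((n : Int) - (j : Nat) - 1).toNat = n - 1 - j := by omega
  rw [e1, show ((4 : Int) ^ (n - 1 - j)) = (((4 ^ (n - 1 - j) : Nat) : Nat) : Int) by push_cast; ring,
      PySem.Int.floordiv_natCast, show (4 : Int) = ((4 : Nat) : Int) from rfl,
      PySem.Int.mod_natCast]

theorem pv_B (riders : Int) (actions : List String) (h : 0 ≤ riders) :
    generate_actions_dict_alt riders actions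
      = (List.range (4 ^ riders.toNat)).map
          (fun i : Nat => ((i : Int), pvRow actions riders.toNat i)) := by
  obtain ⟨n, rfl⟩ : ∃ n : Nat, riders = (n : Int) := ⟨riders.toNat, (Int.toNat_of_nonneg h).symm⟩
  simp only [generate_actions_dict_alt, Int.toNat_natCast]
  rw [pv_rows actions n, PySem.List.enumerate_eq_map_pyRange _ []]
  rw [show PySem.List.len ((List.range (4 ^ n)).map (pvRow actions n))
        = (((4 ^ n : Nat) : Nat) : Int) by simp [PySem.List.len]]
  rw [PySem.List.pyRange_zero_nat, List.map_map]
  apply List.map_congr_left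
  intro k hk
  simp only [List.mem_range] at hk
  simp only [Function.comp]
  congr 1
  rw [PySem.List.pyGetD_natCast, PySem.List.getD_map_range _ _ _ _ hk]

-- ===== VERDICT (by name: the statement is the Claim_ definition above) =====
theorem generate_actions_dict_spec : Claim_equal_generate_actions_dict := by
  intro riders actions _ hpre
  unfold Spec_generate_actions_dict
  rw [pv_A riders actions hpre.1, pv_B riders actions hpre.1]
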